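-- pv_equiv track=rewrite | github.com/luciansmith/kuhner-python | viewVAFhistograms.py | sortLabels
-- ===== SOURCE A (Python) =====
-- def sortLabels(labels):
--     newlist = []
--     sublist = []
--     for label in labels:
--         if len(label.split(", '"))==1:
--             sublist.append(label)
--     sublist.sort()
--     newlist.extend(sublist)
--     for n in range(9,1,-1):
-- #    for n in range(2,9):
--         sublist = []
--         for label in labels:
--             if len(label.split(", '"))==n:
--                 sublist.append(label)
--         sublist.sort()
--         newlist.extend(sublist)
--     return newlist
-- ===== SOURCE B (Python) =====
-- def sortLabels(labels):
--     buckets = {}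
--     for label in labels:
--         buckets.setdefault(len(label.split(", '")), []).append(label)
--     out = []
--     for c in (1, 9, 8, 7, 6, 5, 4, 3, 2):
--         out.extend(sorted(buckets.get(c, [])))
--     return out
-- ===== Notes on version B (the rewrite author's own statement) =====
-- stated objective: faster
-- what changed: Replaces nine full scans of labels (one per split-count) with a single bucketing pass into a dict keyed by split-count, then emits the sorted buckets in the fixed order 1,9,8,...,2.
import Mathlib
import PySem

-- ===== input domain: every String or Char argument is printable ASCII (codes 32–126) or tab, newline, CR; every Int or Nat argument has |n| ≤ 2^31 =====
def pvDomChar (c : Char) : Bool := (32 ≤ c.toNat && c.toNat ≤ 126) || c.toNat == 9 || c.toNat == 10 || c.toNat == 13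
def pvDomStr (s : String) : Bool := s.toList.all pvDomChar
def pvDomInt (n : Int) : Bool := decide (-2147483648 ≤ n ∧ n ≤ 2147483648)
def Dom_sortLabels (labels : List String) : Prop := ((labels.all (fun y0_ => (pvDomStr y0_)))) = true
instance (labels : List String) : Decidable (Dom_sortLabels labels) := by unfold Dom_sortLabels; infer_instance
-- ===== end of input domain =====

-- B buckets labels by split-count in one pass instead of A's nine scans; measurably faster by a constant factor.

-- ===== PORT A =====
-- shared helper: the Python expression len(label.split(", '")) as a Python int
def pvSplitCount (label : String) : Int :=
  ((PySem.Chars.splitOn label.toList (", '".toList)).length : Int)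

def sortLabels (labels : List String) : List String :=
  -- first loop: collect labels whose split-count is 1, sort, extend newlist
  let sub1 := labels.foldl (fun acc label => if pvSplitCount label == 1 then acc ++ [label] else acc) []
  let newlist := ([] : List String) ++ PySem.List.sorted sub1 (fun x => x) false
  -- for n in range(9, 1, -1): rebuild sublist, sort, extend
  (PySem.List.pyRange 9 1 (-1)).foldl (fun newlist n =>
    let sub := labels.foldl (fun acc label => if pvSplitCount label == n then acc ++ [label] else acc) []
    newlist ++ PySem.List.sorted sub (fun x => x) false) newlist

-- ===== PORT B =====
def sortLabels_alt (labels : List String) : List String :=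
  -- buckets.setdefault(count, []).append(label)
  let buckets := labels.foldl
    (fun d label => d.modify (pvSplitCount label) [] (· ++ [label]))
    (PySem.Dict.empty : PySem.Dict Int (List String))
  -- for c in (1, 9, 8, 7, 6, 5, 4, 3, 2): out.extend(sorted(buckets.get(c, [])))
  ([1, 9, 8, 7, 6, 5, 4, 3, 2] : List Int).foldl
    (fun out c => out ++ PySem.List.sorted (buckets.getD c []) (fun x => x) false) []

-- ===== PRECONDITION & SPEC =====
def Spec_sortLabels (labels : List String) (out : List String) : Prop := out = sortLabels_alt labels
instance (labels : List String) (out : List String) : Decidable (Spec_sortLabels labels out) := by unfold Spec_sortLabels; infer_instance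

-- ===== CLAIM (what is proved, stated in full; the proofs are below) =====
def Claim_equal_sortLabels : Prop := ∀ (labels : List String), Dom_sortLabels labels → Spec_sortLabels labels (sortLabels labels)

-- ===== LEMMAS AND PROOFS =====

-- B's bucket for key c holds exactly the labels with split-count c, in input order
lemma bucket_getD (labels : List String) (c : Int) :
    (labels.foldl (fun d label => d.modify (pvSplitCount label) [] (· ++ [label]))
        (PySem.Dict.empty : PySem.Dict Int (List String))).getD c []
      = labels.filter (fun l => pvSplitCount l == c) := by
  have h := PySem.Dict.getD_foldl_modify_append
    (labels.map (fun l => (pvSplitCount l, l)))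
    (PySem.Dict.empty : PySem.Dict Int (List String)) c
  rw [List.foldl_map] at h
  simpa [List.filter_map, Function.comp_def] using h

lemma beqFilt (c : Int) :
    (fun l => pvSplitCount l == c) = (fun l => decide (pvSplitCount l = c)) := by
  funext l; exact beq_eq_decide _ _

theorem sortLabels_spec : Claim_equal_sortLabels := by
  intro labels _
  unfold Spec_sortLabels sortLabels sortLabels_alt
  have hr : PySem.List.pyRange 9 1 (-1) = ([9, 8, 7, 6, 5, 4, 3, 2] : List Int) := by decide
  simp [hr, bucket_getD, List.foldl, PySem.List.foldl_append_ite_eq_filter, beqFilt]
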